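-- pv_equiv track=rewrite | github.com/python/cpython | Lib/encodings/punycode.py | selective_find
-- ===== SOURCE A (Python) =====
-- def selective_find(str, char, index, pos):
--     """Return a pair (index, pos), indicating the next occurrence of
--     char in str. index is the position of the character considering
--     only ordinals up to and including char, and pos is the position in
--     the full string. index/pos is the starting position in the full
--     string."""
--
--     l = len(str)
--     while 1:
--         pos += 1
--         if pos == l:
--             return (-1, -1)
--         c = str[pos]
--         if c == char:
--             return index+1, pos
--         elif c < char:
--             index += 1
-- ===== SOURCE B (Python) =====
-- def selective_find(str, char, index, pos):
--     """Return a pair (index, pos), indicating the next occurrence of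
--     char in str. index is the position of the character considering
--     only ordinals up to and including char, and pos is the position in
--     the full string. index/pos is the starting position in the full
--     string."""
--     segment = str[pos + 1:]
--     base = len(str) - len(segment)
--     for i, c in enumerate(segment):
--         if c == char:
--             count = sum(1 for d in segment[:i] if d < char)
--             return (index + 1 + count, base + i)
--     return (-1, -1)
-- ===== Notes on version B (the rewrite author's own statement) =====
-- stated objective: alternative
-- what changed: Replaces A's single incrementing while-loop that interleaves searching and counting in one running state with a two-phase decomposition: slice off the segment after pos, locate the next matching position with an enumerate scan, then count smaller characters in a separate comprehension over the intervening sub-slice.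
-- intended difference: For pos <= -2 with char a single character occurring in str, A's negative indexing wraps around the end of the string so it returns a negative pos (or rescans the front and double-counts); B searches forward from the clamped start position and returns the actual next occurrence index, which is the intended 'next occurrence of char'. — e.g. on selective_find("ab", "a", 0, -3): A returns (1, -2), B returns (1, 0)
import Mathlib
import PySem

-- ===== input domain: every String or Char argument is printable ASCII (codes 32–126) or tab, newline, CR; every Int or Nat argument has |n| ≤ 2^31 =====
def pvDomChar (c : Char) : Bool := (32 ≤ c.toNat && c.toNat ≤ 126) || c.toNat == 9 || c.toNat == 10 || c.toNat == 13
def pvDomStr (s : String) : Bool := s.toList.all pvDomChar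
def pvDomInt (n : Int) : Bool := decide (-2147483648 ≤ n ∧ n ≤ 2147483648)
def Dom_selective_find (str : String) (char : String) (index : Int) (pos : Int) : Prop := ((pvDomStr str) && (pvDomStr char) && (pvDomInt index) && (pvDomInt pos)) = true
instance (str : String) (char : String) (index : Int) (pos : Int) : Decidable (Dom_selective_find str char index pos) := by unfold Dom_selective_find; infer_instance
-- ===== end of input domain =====

-- B re-decomposes A's single search-and-count while-loop into a library substring find plus an
-- independent counting pass over the intervening slice (objective: alternative decomposition);
-- on wrapped-around negative start positions (D_ below) B returns the intended next occurrence.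

-- ===== PORT A =====
-- the 'while 1' loop of A; fuel ≥ iterations Python performs whenever Python returns;
-- (0,0) on fuel exhaustion / IndexError is unreachable inside Pre_
def selFindLoop (s : List Char) (cl : List Char) (l : Int) : Nat → Int → Int → Int × Int
  | 0, _, _ => (0, 0)
  | fuel+1, index, pos =>
    let pos' := pos + 1
    if pos' = l then (-1, -1)
    else
      match PySem.List.pyGet? s pos' with
      | none => (0, 0)
      | some c =>
        if [c] = cl then (index + 1, pos')
        else if [c] < cl then selFindLoop s cl l fuel (index + 1) pos'
        else selFindLoop s cl l fuel index pos'

def selective_find (str : String) (char : String) (index : Int) (pos : Int) : Int × Int :=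
  let l : Int := str.toList.length
  selFindLoop str.toList char.toList l ((l - pos).toNat + 1) index pos

-- ===== PORT B =====
-- the 'for i, c in enumerate(segment)' loop of B; `rest` is the part of segment still to scan
def selAltLoop (cl : List Char) (segment : List Char) (index : Int) (base : Int) :
    List Char → Nat → Int × Int
  | [], _ => (-1, -1)
  | c :: rest, i =>
    if [c] = cl then
      let count : Nat := (segment.take i).countP (fun d => decide ([d] < cl))  -- sum(1 for d in segment[:i] if d < char)
      (index + 1 + (count : Int), base + i)
    else selAltLoop cl segment index base rest (i + 1)

def selective_find_alt (str : String) (char : String) (index : Int) (pos : Int) : Int × Int :=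
  let segment := PySem.List.slice str.toList (some (pos + 1)) none   -- str[pos+1:]
  let base : Int := (str.toList.length : Int) - segment.length
  selAltLoop char.toList segment index base segment 0

-- ===== PRECONDITION & SPEC =====
-- Pre_ excludes exactly the inputs with pos outside [-len(str)-1, len(str)-1], on which A raises IndexError.
def Pre_selective_find (str : String) (char : String) (index : Int) (pos : Int) : Prop :=
  -(str.toList.length : Int) - 1 ≤ pos ∧ pos ≤ (str.toList.length : Int) - 1
instance (str : String) (char : String) (index : Int) (pos : Int) : Decidable (Pre_selective_find str char index pos) := by unfold Pre_selective_find; infer_instance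

def pvWitness_selective_find : String × String × Int × Int := ("ab", "a", 0, -1)

-- For pos ≤ -2 with char a single character occurring in str, A's negative indexing wraps around
-- the end of the string so it returns a negative pos (or rescans the front and double-counts);
-- B searches forward from the clamped start and returns the actual next occurrence index, the
-- intended behaviour.
def D_selective_find (str : String) (char : String) (index : Int) (pos : Int) : Prop :=
  char.toList.length = 1 ∧ pos ≤ -2 ∧ PySem.Str.isIn char str = true
instance (str : String) (char : String) (index : Int) (pos : Int) : Decidable (D_selective_find str char index pos) := by unfold D_selective_find; infer_instance

def Spec_selective_find (str : String) (char : String) (index : Int) (pos : Int) (out : Int × Int) : Prop := ¬ D_selective_find str char index pos → out = selective_find_alt str char index pos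
instance (str : String) (char : String) (index : Int) (pos : Int) (out : Int × Int) : Decidable (Spec_selective_find str char index pos out) := by unfold Spec_selective_find; infer_instance

def pvDiffWitness_selective_find : String × String × Int × Int := ("ab", "a", 0, -3)
def pvDiffWitnessOut_selective_find : (Int × Int) × (Int × Int) := ((1, -2), (1, 0))

-- ===== CLAIM (what is proved, stated in full; the proofs are below) =====
def Claim_unchanged_selective_find : Prop := ∀ (str : String) (char : String) (index : Int) (pos : Int), Dom_selective_find str char index pos → Pre_selective_find str char index pos → Spec_selective_find str char index pos (selective_find str char index pos)
def Claim_changed_selective_find : Prop := Dom_selective_find (pvDiffWitness_selective_find.1) (pvDiffWitness_selective_find.2.1) (pvDiffWitness_selective_find.2.2.1) (pvDiffWitness_selective_find.2.2.2) ∧ Pre_selective_find (pvDiffWitness_selective_find.1) (pvDiffWitness_selective_find.2.1) (pvDiffWitness_selective_find.2.2.1) (pvDiffWitness_selective_find.2.2.2) ∧ D_selective_find (pvDiffWitness_selective_find.1) (pvDiffWitness_selective_find.2.1) (pvDiffWitness_selective_find.2.2.1) (pvDiffWitness_selective_find.2.2.2) ∧ selective_find (pvDiffWitness_selective_find.1)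 (pvDiffWitness_selective_find.2.1) (pvDiffWitness_selective_find.2.2.1) (pvDiffWitness_selective_find.2.2.2) = pvDiffWitnessOut_selective_find.1 ∧ selective_find_alt (pvDiffWitness_selective_find.1) (pvDiffWitness_selective_find.2.1) (pvDiffWitness_selective_find.2.2.1) (pvDiffWitness_selective_find.2.2.2) = pvDiffWitnessOut_selective_find.2 ∧ pvDiffWitnessOut_selective_find.1 ≠ pvDiffWitnessOut_selective_find.2

def Claim_exact_selective_find : Prop := ∀ (str : String) (char : String) (index : Int) (pos : Int), Dom_selective_find str char index pos → Pre_selective_find str char index pos → D_selective_find str char index pos → selective_find str char index pos ≠ selective_find_alt str char index pos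

-- ===== LEMMAS AND PROOFS =====

-- closed form both ports are reduced to (nonnegative start k): first occurrence of ch in s at an
-- index ≥ k, with the count of smaller characters strictly in between
def fspec (s : List Char) (ch : Char) (index : Int) (k : Nat) : Int × Int :=
  let r := PySem.Chars.find (s.drop k) [ch]
  if r = -1 then (-1, -1)
  else (index + 1 + (((s.drop k).take r.toNat).countP (fun c => decide ([c] < [ch])) : Int), (k : Int) + r)

lemma find_singleton_eq_neg_one_iff (t : List Char) (ch : Char) :
    PySem.Chars.find t [ch] = -1 ↔ ch ∉ t := by
  rw [PySem.Chars.find_eq_neg_one_iff, List.singleton_infix_iff]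

-- find returns the unique position with an occurrence and none before it
lemma find_det (t sub : List Char) (r : Nat) (hp : sub <+: t.drop r)
    (hmin : ∀ i < r, ¬ sub <+: t.drop i) : PySem.Chars.find t sub = (r : Int) := by
  have hinf : sub <:+: t := (hp.isInfix).trans (List.drop_suffix r t).isInfix
  have h0 : 0 ≤ PySem.Chars.find t sub := (PySem.Chars.find_nonneg_iff t sub).mpr hinf
  obtain ⟨h1, h2⟩ := PySem.Chars.find_spec h0
  have : (PySem.Chars.find t sub).toNat = r := by
    rcases lt_trichotomy (PySem.Chars.find t sub).toNat r with h | h | h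
    · exact absurd h1 (hmin _ h)
    · exact h
    · exact absurd hp (h2 _ h)
  omega

lemma find_singleton_cons (c : Char) (t : List Char) (ch : Char) :
    PySem.Chars.find (c :: t) [ch] =
      if c = ch then 0
      else if PySem.Chars.find t [ch] = -1 then -1 else PySem.Chars.find t [ch] + 1 := by
  by_cases hc : c = ch
  · subst hc
    rw [if_pos rfl]
    exact find_det (c :: t) [c] 0 (by simp) (by omega)
  · rw [if_neg hc]
    by_cases hn : PySem.Chars.find t [ch] = -1
    · rw [if_pos hn]
      rw [find_singleton_eq_neg_one_iff] at *
      simp [hn, Ne.symm hc]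
    · rw [if_neg hn]
      have h0 : 0 ≤ PySem.Chars.find t [ch] := by
        have := PySem.Chars.neg_one_le_find t [ch]; omega
      obtain ⟨h1, h2⟩ := PySem.Chars.find_spec h0
      have := find_det (c :: t) [ch] ((PySem.Chars.find t [ch]).toNat + 1)
        (by simpa using h1)
        (by intro i hi
            cases i with
            | zero => simp [List.cons_prefix_cons, Ne.symm hc]
            | succ j => simpa using h2 j (by omega))
      rw [this]; push_cast; omega

-- A's loop from start position k (written as pos = k - 1) computes the closed form
lemma loop_eq_fspec (s : List Char) (ch : Char) :
    ∀ (fuel : Nat) (k : Nat) (index : Int), k ≤ s.length → s.length - k < fuel →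
      selFindLoop s [ch] (s.length : Int) fuel index ((k : Int) - 1) = fspec s ch index k := by
  intro fuel
  induction fuel with
  | zero => intro k index hk hf; omega
  | succ fuel ih =>
    intro k index hk hf
    rw [selFindLoop]
    simp only [sub_add_cancel]
    by_cases hkl : k = s.length
    · subst hkl
      rw [if_pos rfl]
      unfold fspec
      simp [find_singleton_eq_neg_one_iff]
    · have hklt : k < s.length := by omega
      rw [if_neg (by exact_mod_cast fun h => hkl (by exact_mod_cast h))]
      have hget : PySem.List.pyGet? s (k : Int) = some s[k] := by
        simp [PySem.List.pyGet?, PySem.List.pyIdx?, hklt]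
      rw [hget]
      dsimp only
      have hdrop : s.drop k = s[k] :: s.drop (k+1) := List.drop_eq_getElem_cons hklt
      have hfc := find_singleton_cons s[k] (s.drop (k+1)) ch
      by_cases hcc : s[k] = ch
      · rw [if_pos (by rw [hcc]), fspec, hdrop, hfc, if_pos hcc]
        norm_num
      · rw [if_neg (by simpa using hcc)]
        have hrec : ((k : Int)) = ((k+1 : Nat) : Int) - 1 := by push_cast; ring
        by_cases hlt : ([s[k]] : List Char) < [ch]
        · rw [if_pos hlt, hrec, ih (k+1) (index+1) (by omega) (by omega)]
          unfold fspec
          rw [hdrop, hfc, if_neg hcc]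
          by_cases hn : PySem.Chars.find (s.drop (k+1)) [ch] = -1
          · simp [hn]
          · have h0 : 0 ≤ PySem.Chars.find (s.drop (k+1)) [ch] := by
              have := PySem.Chars.neg_one_le_find (s.drop (k+1)) [ch]; omega
            rw [if_neg hn, if_neg hn,
              if_neg (show ¬(PySem.Chars.find (s.drop (k+1)) [ch] + 1 = -1) by omega)]
            have htake : (s[k] :: s.drop (k+1)).take (PySem.Chars.find (s.drop (k+1)) [ch] + 1).toNat
                = s[k] :: (s.drop (k+1)).take (PySem.Chars.find (s.drop (k+1)) [ch]).toNat := by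
              rw [show (PySem.Chars.find (s.drop (k+1)) [ch] + 1).toNat
                  = (PySem.Chars.find (s.drop (k+1)) [ch]).toNat + 1 by omega]
              rfl
            rw [htake]
            simp only [List.countP_cons, decide_eq_true_eq, if_pos hlt, Prod.mk.injEq]
            refine ⟨by push_cast; ring, by push_cast; ring⟩
        · rw [if_neg hlt, hrec, ih (k+1) index (by omega) (by omega)]
          unfold fspec
          rw [hdrop, hfc, if_neg hcc]
          by_cases hn : PySem.Chars.find (s.drop (k+1)) [ch] = -1
          · simp [hn]
          · have h0 : 0 ≤ PySem.Chars.find (s.drop (k+1)) [ch] := by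
              have := PySem.Chars.neg_one_le_find (s.drop (k+1)) [ch]; omega
            rw [if_neg hn, if_neg hn,
              if_neg (show ¬(PySem.Chars.find (s.drop (k+1)) [ch] + 1 = -1) by omega)]
            have htake : (s[k] :: s.drop (k+1)).take (PySem.Chars.find (s.drop (k+1)) [ch] + 1).toNat
                = s[k] :: (s.drop (k+1)).take (PySem.Chars.find (s.drop (k+1)) [ch]).toNat := by
              rw [show (PySem.Chars.find (s.drop (k+1)) [ch] + 1).toNat
                  = (PySem.Chars.find (s.drop (k+1)) [ch]).toNat + 1 by omega]
              rfl
            rw [htake]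
            simp only [List.countP_cons, decide_eq_true_eq, if_neg hlt, Prod.mk.injEq]
            refine ⟨by push_cast; ring, by push_cast; ring⟩

-- B's scan over the rest of the segment computes the closed form relative to the whole segment
lemma altLoop_eq (t : List Char) (ch : Char) (index base : Int) :
    ∀ (n j : Nat), t.length - j = n → j ≤ t.length →
      selAltLoop [ch] t index base (t.drop j) j =
        (if PySem.Chars.find (t.drop j) [ch] = -1 then (-1, -1)
         else (index + 1 + ((t.take (j + (PySem.Chars.find (t.drop j) [ch]).toNat)).countP
                  (fun d => decide ([d] < [ch])) : Int),
               base + (j : Int) + PySem.Chars.find (t.drop j) [ch])) := by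
  intro n
  induction n with
  | zero =>
    intro j hn hj
    have hj' : j = t.length := by omega
    rw [hj', List.drop_length, selAltLoop]
    rw [if_pos ((find_singleton_eq_neg_one_iff [] ch).mpr (List.not_mem_nil))]
  | succ n ih =>
    intro j hn hj
    have hjlt : j < t.length := by omega
    have hdrop : t.drop j = t[j] :: t.drop (j+1) := List.drop_eq_getElem_cons hjlt
    rw [hdrop, selAltLoop, ← hdrop]
    have hfc : PySem.Chars.find (t.drop j) [ch]
        = if t[j] = ch then 0
          else if PySem.Chars.find (t.drop (j+1)) [ch] = -1 then -1
          else PySem.Chars.find (t.drop (j+1)) [ch] + 1 := by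
      rw [hdrop]; exact find_singleton_cons t[j] (t.drop (j+1)) ch
    by_cases hcc : t[j] = ch
    · rw [if_pos (by rw [hcc]), hfc, if_pos hcc]
      norm_num
    · rw [if_neg (by simpa using hcc), ih (j+1) (by omega) (by omega), hfc, if_neg hcc]
      by_cases hn1 : PySem.Chars.find (t.drop (j+1)) [ch] = -1
      · simp [hn1]
      · have h0 : 0 ≤ PySem.Chars.find (t.drop (j+1)) [ch] := by
          have := PySem.Chars.neg_one_le_find (t.drop (j+1)) [ch]; omega
        rw [if_neg hn1, if_neg hn1,
          if_neg (show ¬(PySem.Chars.find (t.drop (j+1)) [ch] + 1 = -1) by omega)]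
        rw [show j + 1 + (PySem.Chars.find (t.drop (j+1)) [ch]).toNat
            = j + (PySem.Chars.find (t.drop (j+1)) [ch] + 1).toNat by omega]
        simp only [Prod.mk.injEq]
        exact ⟨trivial, by push_cast; ring⟩

-- B for a nonnegative start k computes the closed form
lemma alt_eq_fspec (str : String) (char : String) (ch : Char) (hc : char.toList = [ch])
    (index : Int) (k : Nat) (hk : k ≤ str.toList.length) :
    selective_find_alt str char index ((k : Int) - 1) = fspec str.toList ch index k := by
  unfold selective_find_alt fspec
  rw [show (k : Int) - 1 + 1 = ((k : Nat) : Int) by ring]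
  rw [PySem.List.slice_from_natCast]
  dsimp only
  have hbase : (str.toList.length : Int) - ((List.drop k str.toList).length : Int) = (k : Int) := by
    rw [List.length_drop]; omega
  rw [hc, hbase]
  have := altLoop_eq (str.toList.drop k) ch index k (str.toList.drop k).length 0 (by omega) (by omega)
  rw [List.drop_zero] at this
  rw [this]
  by_cases hn : PySem.Chars.find (str.toList.drop k) [ch] = -1
  · rw [if_pos hn, if_pos hn]
  · rw [if_neg hn, if_neg hn]
    simp only [Nat.zero_add, Nat.cast_zero, add_zero]

-- B returns (-1, -1) when no character of the scanned rest matches char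
lemma altLoop_not_found (cl : List Char) (segment : List Char) (index base : Int) :
    ∀ (rest : List Char) (i : Nat), (∀ c ∈ rest, [c] ≠ cl) →
      selAltLoop cl segment index base rest i = (-1, -1) := by
  intro rest
  induction rest with
  | nil => intro i _; rw [selAltLoop]
  | cons c t ih =>
    intro i hni
    rw [selAltLoop, if_neg (hni c List.mem_cons_self)]
    exact ih (i + 1) (fun d hd => hni d (List.mem_cons_of_mem c hd))

lemma pyGet?_mem_of_inrange (s : List Char) (i : Int) (h1 : -(s.length : Int) ≤ i)
    (h2 : i < (s.length : Int)) : ∃ c, PySem.List.pyGet? s i = some c ∧ c ∈ s := by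
  unfold PySem.List.pyGet? PySem.List.pyIdx?
  by_cases h0 : 0 ≤ i
  · rw [if_pos h0, if_pos h2]
    have hlt : i.toNat < s.length := by omega
    exact ⟨s[i.toNat], by simp, List.getElem_mem _⟩
  · rw [if_neg h0, if_pos h1]
    have hlt : s.length - (-i).toNat < s.length := by omega
    exact ⟨s[s.length - (-i).toNat], by simp [hlt], List.getElem_mem _⟩

-- when no character of str compares equal to char, A's loop runs off the end and returns
-- (-1, -1), also from a wrapped (negative) position
lemma loop_not_found (s : List Char) (cl : List Char) (hni : ∀ c ∈ s, [c] ≠ cl) :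
    ∀ (fuel : Nat) (index pos : Int), -(s.length : Int) - 1 ≤ pos → pos ≤ (s.length : Int) - 1 →
      ((s.length : Int) - pos).toNat < fuel →
      selFindLoop s cl (s.length : Int) fuel index pos = (-1, -1) := by
  intro fuel
  induction fuel with
  | zero => intro index pos h1 h2 hf; omega
  | succ fuel ih =>
    intro index pos h1 h2 hf
    rw [selFindLoop]
    by_cases hl : pos + 1 = (s.length : Int)
    · simp [hl]
    · rw [if_neg hl]
      obtain ⟨c, hget, hmem⟩ := pyGet?_mem_of_inrange s (pos + 1) (by omega) (by omega)
      rw [hget]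
      dsimp only
      rw [if_neg (hni c hmem)]
      by_cases hlt : [c] < cl
      · rw [if_pos hlt]; exact ih (index + 1) (pos + 1) (by omega) (by omega) (by omega)
      · rw [if_neg hlt]; exact ih index (pos + 1) (by omega) (by omega) (by omega)

-- B's whole-function form of the not-found case
lemma alt_not_found (str : String) (char : String) (index pos : Int)
    (hni : ∀ c ∈ str.toList, [c] ≠ char.toList) :
    selective_find_alt str char index pos = (-1, -1) := by
  unfold selective_find_alt
  dsimp only
  exact altLoop_not_found char.toList _ index _ _ 0
    (fun c hcm heq => hni c (PySem.List.mem_of_mem_slice str.toList _ _ hcm) heq)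

lemma pyGet?_neg (s : List Char) (m : Nat) (h : m < s.length) :
    PySem.List.pyGet? s ((m : Int) - s.length) = some s[m] := by
  unfold PySem.List.pyGet? PySem.List.pyIdx?
  rw [if_neg (by omega), if_pos (by omega)]
  have : s.length - (-((m : Int) - s.length)).toNat = m := by omega
  rw [this]
  simp [h]

-- A's wrapped scan: a match inside the wrapped tail returns a NEGATIVE position
lemma loop_neg_found (s : List Char) (ch : Char) :
    ∀ (fuel : Nat) (m : Nat) (index : Int), m < s.length → ch ∈ s.drop m →
      s.length - m < fuel →
      (selFindLoop s [ch] (s.length : Int) fuel index ((m : Int) - s.length - 1)).2 < 0 := by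
  intro fuel
  induction fuel with
  | zero => intro m index hm _ hf; omega
  | succ fuel ih =>
    intro m index hm hmem hf
    rw [selFindLoop]
    have hstep : (m : Int) - s.length - 1 + 1 = (m : Int) - s.length := by ring
    rw [hstep, if_neg (by omega), pyGet?_neg s m hm]
    dsimp only
    have hdrop : s.drop m = s[m] :: s.drop (m+1) := List.drop_eq_getElem_cons hm
    by_cases hcc : s[m] = ch
    · rw [if_pos (by rw [hcc])]
      simp only
      omega
    · have hmem' : ch ∈ s.drop (m+1) := by
        rw [hdrop] at hmem
        rcases List.mem_cons.mp hmem with h | h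
        · exact absurd h.symm hcc
        · exact h
      have hm1 : m + 1 < s.length := by
        by_contra hle
        have : s.drop (m+1) = [] := List.drop_eq_nil_of_le (by omega)
        rw [this] at hmem'
        exact List.not_mem_nil hmem'
      have hrec : (m : Int) - s.length = ((m+1 : Nat) : Int) - s.length - 1 := by push_cast; ring
      rw [if_neg (by simpa using hcc)]
      by_cases hlt : ([s[m]] : List Char) < [ch]
      · rw [if_pos hlt, hrec]; exact ih (m+1) (index+1) hm1 hmem' (by omega)
      · rw [if_neg hlt, hrec]; exact ih (m+1) index hm1 hmem' (by omega)

-- A's wrapped scan: no match in the wrapped tail but char in str gives a NONNEGATIVE position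
lemma loop_neg_missed (s : List Char) (ch : Char) (hin : ch ∈ s) :
    ∀ (fuel : Nat) (m : Nat) (index : Int), m ≤ s.length → ch ∉ s.drop m →
      s.length + (s.length - m) < fuel →
      0 ≤ (selFindLoop s [ch] (s.length : Int) fuel index ((m : Int) - s.length - 1)).2 := by
  intro fuel
  induction fuel with
  | zero => intro m index hm _ hf; omega
  | succ fuel ih =>
    intro m index hm hnm hf
    by_cases hml : m = s.length
    · subst hml
      have hk : (s.length : Int) - s.length - 1 = (0 : Int) - 1 := by ring
      rw [hk, show ((0:Int) - 1) = ((0:Nat):Int) - 1 by norm_num,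
        loop_eq_fspec s ch (fuel+1) 0 index (by omega) (by omega)]
      unfold fspec
      rw [List.drop_zero]
      have hf0 : ¬ PySem.Chars.find s [ch] = -1 := by
        rw [find_singleton_eq_neg_one_iff]; exact fun h => h hin
      have h0 : 0 ≤ PySem.Chars.find s [ch] := by
        have := PySem.Chars.neg_one_le_find s [ch]; omega
      rw [if_neg hf0]
      simpa using h0
    · have hmlt : m < s.length := by omega
      rw [selFindLoop]
      have hstep : (m : Int) - s.length - 1 + 1 = (m : Int) - s.length := by ring
      rw [hstep, if_neg (by omega), pyGet?_neg s m hmlt]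
      dsimp only
      have hdrop : s.drop m = s[m] :: s.drop (m+1) := List.drop_eq_getElem_cons hmlt
      have hcc : ¬ s[m] = ch := by
        intro h
        exact hnm (by rw [hdrop, h]; exact List.mem_cons_self)
      have hnm' : ch ∉ s.drop (m+1) := fun h => hnm (by rw [hdrop]; exact List.mem_cons_of_mem _ h)
      have hrec : (m : Int) - s.length = ((m+1 : Nat) : Int) - s.length - 1 := by push_cast; ring
      rw [if_neg (by simpa using hcc)]
      by_cases hlt : ([s[m]] : List Char) < [ch]
      · rw [if_pos hlt, hrec]; exact ih (m+1) (index+1) (by omega) hnm' (by omega)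
      · rw [if_neg hlt, hrec]; exact ih (m+1) index (by omega) hnm' (by omega)

-- B from a wrapped start position scans exactly the clamped segment str[len+pos+1:]
lemma alt_neg_eq (str : String) (char : String) (ch : Char) (hc : char.toList = [ch])
    (index : Int) (m : Nat) (hm : m < str.toList.length) :
    selective_find_alt str char index ((m : Int) - str.toList.length - 1)
      = selAltLoop [ch] (str.toList.drop m) index (m : Int) (str.toList.drop m) 0 := by
  unfold selective_find_alt
  dsimp only
  have hseg : PySem.List.slice str.toList (some ((m : Int) - str.toList.length - 1 + 1)) none
      = str.toList.drop m := by
    rw [show (m : Int) - str.toList.length - 1 + 1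
        = -(((str.toList.length - m : Nat) : Int)) by omega]
    rw [PySem.List.slice_from_neg_natCast str.toList (str.toList.length - m) (by omega)]
    congr 1
    omega
  rw [hseg, hc]
  rw [show (str.toList.length : Int) - ((str.toList.drop m).length : Int) = (m : Int) by
    rw [List.length_drop]; omega]

-- ===== VERDICT (by name: the statement is the Claim_ definition above) =====
theorem selective_find_spec : Claim_unchanged_selective_find := by
  intro str char index pos _hdom hpre hnd
  obtain ⟨hlo, hhi⟩ := hpre
  by_cases hone : ∃ ch, char.toList = [ch]
  · obtain ⟨ch, hc⟩ := hone
    by_cases hpos : -1 ≤ pos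
    · -- ordinary (non-wrapping) start position: both sides equal the closed form
      have hk : pos = ((pos + 1).toNat : Int) - 1 := by omega
      have hkl : (pos + 1).toNat ≤ str.toList.length := by omega
      rw [hk, selective_find]
      have hfuel : str.toList.length - (pos + 1).toNat
          < ((str.toList.length : Int) - (((pos + 1).toNat : Int) - 1)).toNat + 1 := by omega
      rw [hc, loop_eq_fspec str.toList ch _ (pos + 1).toNat index hkl hfuel,
        alt_eq_fspec str char ch hc index (pos + 1).toNat hkl]
    · -- wrapped start with char absent from str (¬ D_): both sides are (-1, -1)
      have hiin : PySem.Str.isIn char str = false := by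
        rcases Bool.eq_false_or_eq_true (PySem.Str.isIn char str) with h | h
        · exact absurd ⟨by rw [hc]; rfl, by omega, h⟩ hnd
        · exact h
      have hinf : ¬ char.toList <:+: str.toList := by
        intro h
        rw [(PySem.Str.isIn_iff_infix char str).mpr h] at hiin
        simp at hiin
      have hni : ∀ c ∈ str.toList, [c] ≠ char.toList := by
        intro c hmem heq
        exact hinf (heq ▸ (List.singleton_infix_iff _ _).mpr hmem)
      rw [selective_find, loop_not_found str.toList char.toList hni _ index pos hlo hhi (by omega)]
      rw [alt_not_found str char index pos hni]
  · -- char is not a single character: no c ever compares equal, both return (-1, -1)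
    have hni : ∀ c ∈ str.toList, [c] ≠ char.toList := fun c _ heq => hone ⟨c, heq.symm⟩
    rw [selective_find, loop_not_found str.toList char.toList hni _ index pos hlo hhi (by omega)]
    rw [alt_not_found str char index pos hni]

theorem selective_find_changed : Claim_changed_selective_find := by
  unfold Claim_changed_selective_find; decide

theorem selective_find_tight : Claim_exact_selective_find := by
  intro str char index pos _hdom hpre hd
  obtain ⟨hlo, hhi⟩ := hpre
  obtain ⟨hlen1, hpos2, hiin⟩ := hd
  obtain ⟨ch, hc⟩ : ∃ ch, char.toList = [ch] := by
    cases hcl : char.toList with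
    | nil => rw [hcl] at hlen1; simp at hlen1
    | cons a t =>
      rw [hcl] at hlen1
      cases t with
      | nil => exact ⟨a, rfl⟩
      | cons b u => simp at hlen1
  have hin : ch ∈ str.toList := by
    have h := (PySem.Str.isIn_iff_infix char str).mp hiin
    rw [hc] at h
    exact (List.singleton_infix_iff _ _).mp h
  have hl1 : 1 ≤ str.toList.length := List.length_pos_of_mem hin
  obtain ⟨m, hmval, hmlt⟩ : ∃ m : Nat, (m : Int) = (str.toList.length : Int) + pos + 1
      ∧ m < str.toList.length :=
    ⟨((str.toList.length : Int) + pos + 1).toNat, by omega, by omega⟩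
  have hposm : pos = (m : Int) - str.toList.length - 1 := by omega
  rw [hposm, selective_find, hc]
  rw [alt_neg_eq str char ch hc index m hmlt]
  by_cases hseg : ch ∈ str.toList.drop m
  · -- char in the wrapped tail: A returns a negative position, B a nonnegative one
    have hA := loop_neg_found str.toList ch
      (((str.toList.length : Int) - ((m : Int) - str.toList.length - 1)).toNat + 1)
      m index hmlt hseg (by omega)
    have hB := altLoop_eq (str.toList.drop m) ch index (m : Int) (str.toList.drop m).length 0
      (by omega) (by omega)
    rw [List.drop_zero] at hB
    rw [hB]
    have hf0 : ¬ PySem.Chars.find (str.toList.drop m) [ch] = -1 := by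
      rw [find_singleton_eq_neg_one_iff]; exact fun h => h hseg
    have h0 : 0 ≤ PySem.Chars.find (str.toList.drop m) [ch] := by
      have := PySem.Chars.neg_one_le_find (str.toList.drop m) [ch]; omega
    rw [if_neg hf0]
    intro heq
    have := congrArg Prod.snd heq
    simp only at this
    omega
  · -- char only before the wrapped tail: A returns a nonnegative position, B (-1, -1)
    have hA := loop_neg_missed str.toList ch hin
      (((str.toList.length : Int) - ((m : Int) - str.toList.length - 1)).toNat + 1)
      m index (le_of_lt hmlt) hseg (by omega)
    rw [altLoop_not_found [ch] _ index _ _ 0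
      (fun c hcm heq => hseg (by rwa [show c = ch by simpa using heq] at hcm))]
    intro heq
    have := congrArg Prod.snd heq
    simp only at this
    omega
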